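-- pv_equiv track=rewrite | github.com/Avi-141/Competitive_Programming | Hackerearth/June_circuits19/FunctionValue.py | sumf
-- ===== SOURCE A (Python) =====
-- def f(n, P):
--     m = n // 2
--     if n % 2 == 1:
--         #u = 3 ** m
--         u = pow(3, m, P)
--     else:
--         if m % 2 == 0:
--             #u = (3 ** m + 5) // 2
--             u = (pow(3, m, 2 * P) + 5) // 2
--         else:
--             #u = (3 ** m - 1) // 2
--             u = (pow(3, m, 2 * P) - 1) // 2
--     return u % P
--
-- def sumf(N, P):
--     # sum of full blocks of 4:
--     # 4*k+1, 4*k+2, 4*k+3, 4*k+4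
--     # for k in 0...N//4-1
--     if N == 0:
--         return 0
--     n = N // 4 - 1
--     if n >= 0:
--         '''
--         # sum of 4*k + 1 and 4*k + 3 (<= 4*n+4)
--         sum1 = (9 ** (n + 1) - 1) // 2
--         # sum of 4*k + 2 (<= 4*n+4)
--         sum2 = (3 * 9 ** (n + 1) - 8 * n - 11) // 16
--         # sum of 4*k+4 (<= 4*n+4)
--         sum3 = (9 ** (n + 2) + 40 * n + 31) // 16
--         sum1 = sum1 + sum2 + sum3
--         '''
--         #sum1 = (20 * 9 ** (n + 1) + 32 * n + 12) // 16
--         sum1 = (20 * pow(9, n + 1, 16 * P) + 32 * n + 12) // 16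
--     else:
--         sum1 = 0
--     # sum from 4*n+5 to N
--     sum2 = 0
--     for i in range(4 * n + 5, N + 1):
--         sum2 += f(i, P)
--     return (sum1 + sum2) % P
-- ===== SOURCE B (Python) =====
-- def f(n, P):
--     m = n // 2
--     if n % 2 == 1:
--         u = pow(3, m, P)
--     else:
--         if m % 2 == 0:
--             u = (pow(3, m, 2 * P) + 5) // 2
--         else:
--             u = (pow(3, m, 2 * P) - 1) // 2
--     return u % P
--
--
-- def _geom9(q, M):
--     # sum of 9**k for k in 0..q-1, reduced mod M, by halving the exponent range
--     if q == 0: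
--         return 0
--     if q % 2 == 1:
--         return (1 + 9 * _geom9(q - 1, M)) % M
--     h = q // 2
--     return (_geom9(h, M) * (1 + pow(9, h, M))) % M
--
--
-- def sumf(N, P):
--     # f(4k+1)+f(4k+2)+f(4k+3)+f(4k+4) = 10*9**k + 2, so the q = N//4 full
--     # blocks sum to 10*(sum of 9**k, k<q) + 2*q; add the leftover tail.
--     q = N // 4
--     total = 10 * _geom9(q, P) + 2 * q
--     for i in range(4 * q + 1, N + 1):
--         total += f(i, P)
--     return total % P
-- ===== Notes on version B (the rewrite author's own statement) =====
-- stated objective: alternative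
-- what changed: A computes the block total with one modular pow at the scaled modulus 16*P plus the magic closed form (20*pow(9,n+1,16P)+32n+12)//16; B instead decomposes the range into q=N//4 four-element blocks summing 10*9^k+2 and accumulates the geometric series sum(9^k) mod P by a halving divide-and-conquer recursion, with no scaled modulus and no floor-division trick.
-- outside the precondition, e.g. on sumf(-3, 5): A returns 4, B does not finish within the time limit
import Mathlib
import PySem

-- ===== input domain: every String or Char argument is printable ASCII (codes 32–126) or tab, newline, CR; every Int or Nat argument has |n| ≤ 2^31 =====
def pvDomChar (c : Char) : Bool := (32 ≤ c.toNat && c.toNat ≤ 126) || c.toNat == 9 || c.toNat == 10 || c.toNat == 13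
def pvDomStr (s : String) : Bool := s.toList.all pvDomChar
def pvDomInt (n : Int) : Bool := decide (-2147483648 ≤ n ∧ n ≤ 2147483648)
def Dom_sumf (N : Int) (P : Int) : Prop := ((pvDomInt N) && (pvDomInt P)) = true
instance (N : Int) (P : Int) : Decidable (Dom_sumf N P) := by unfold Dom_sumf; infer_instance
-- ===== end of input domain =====

-- B replaces A's single scaled-modulus pow + magic closed form by per-block geometric-series
-- accumulation mod P (alternative decomposition, similar cost); return values only, no mutation.

-- ===== PORT A =====
-- helper f from the module (identical source in Source A and Source B, so shared by both ports)
def pyF (n : Int) (P : Int) : Int :=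
  let m := PySem.Int.floordiv n 2
  let u :=
    if PySem.Int.mod n 2 = 1 then
      -- pow(3, m, P); every call reached under Pre_ has m ≥ 0, so e := m.toNat is exact
      PySem.Int.powMod 3 m.toNat P
    else
      if PySem.Int.mod m 2 = 0 then
        PySem.Int.floordiv (PySem.Int.powMod 3 m.toNat (2 * P) + 5) 2
      else
        PySem.Int.floordiv (PySem.Int.powMod 3 m.toNat (2 * P) - 1) 2
  PySem.Int.mod u P

def sumf (N : Int) (P : Int) : Int :=
  if N = 0 then 0
  else
    let n := PySem.Int.floordiv N 4 - 1
    let sum1 :=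
      if n ≥ 0 then
        -- (20 * pow(9, n + 1, 16 * P) + 32 * n + 12) // 16 ; n + 1 ≥ 1 in this branch
        PySem.Int.floordiv (20 * PySem.Int.powMod 9 (n + 1).toNat (16 * P) + 32 * n + 12) 16
      else 0
    let sum2 := (PySem.List.pyRange (4 * n + 5) (N + 1) 1).foldl (fun s i => s + pyF i P) 0
    PySem.Int.mod (sum1 + sum2) P

-- ===== PORT B =====
def geom9 (q : Int) (M : Int) : Int :=
  -- Python base case 'if q == 0: return 0'; for q < 0 Python recurses forever, so that
  -- region (unreachable from sumf_alt under Pre_) is folded into the base guard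
  if q ≤ 0 then 0
  else if PySem.Int.mod q 2 = 1 then
    PySem.Int.mod (1 + 9 * geom9 (q - 1) M) M
  else
    PySem.Int.mod
      (geom9 (PySem.Int.floordiv q 2) M *
        (1 + PySem.Int.powMod 9 (PySem.Int.floordiv q 2).toNat M)) M
termination_by q.toNat
decreasing_by
  · omega
  · rw [PySem.Int.floordiv_eq_ediv_of_pos (by omega : (0:Int) < 2)]
    omega

def sumf_alt (N : Int) (P : Int) : Int :=
  let q := PySem.Int.floordiv N 4
  let total := 10 * geom9 q P + 2 * q
  let total := (PySem.List.pyRange (4 * q + 1) (N + 1) 1).foldl (fun s i => s + pyF i P) total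
  PySem.Int.mod total P

-- ===== PRECONDITION & SPEC =====
-- Pre_ excludes P = 0, on which A raises (ValueError from pow / ZeroDivisionError), and N < 0,
-- outside the natural domain of 'sum of f(i) for i = 1..N', where A either raises ValueError
-- (when 3 divides P) or returns an accidental negative-exponent-pow sum over negative indices
-- while B's recursion does not terminate.
def Pre_sumf (N : Int) (P : Int) : Prop := 0 ≤ N ∧ P ≠ 0
instance (N : Int) (P : Int) : Decidable (Pre_sumf N P) := by unfold Pre_sumf; infer_instance
def pvWitness_sumf : Int × Int := (7, 5)

def Spec_sumf (N : Int) (P : Int) (out : Int) : Prop := out = sumf_alt N P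
instance (N : Int) (P : Int) (out : Int) : Decidable (Spec_sumf N P out) := by unfold Spec_sumf; infer_instance

-- ===== CLAIM (what is proved, stated in full; the proofs are below) =====
def Claim_equal_sumf : Prop := ∀ (N : Int) (P : Int), Dom_sumf N P → Pre_sumf N P → Spec_sumf N P (sumf N P)

-- ===== LEMMAS AND PROOFS =====

-- geomTrue q = 1 + 9 + … + 9^(q-1), the exact number of which both block formulas are
-- modular residues
def geomTrue : Nat → Int
  | 0 => 0
  | q + 1 => 1 + 9 * geomTrue q

theorem geomTrue_succ_top (q : Nat) : geomTrue (q + 1) = geomTrue q + 9 ^ q := by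
  induction q with
  | zero => simp [geomTrue]
  | succ k ih =>
    have h2 : (1:Int) + 9 * geomTrue k = geomTrue k + 9 ^ k := by simpa [geomTrue] using ih
    show 1 + 9 * geomTrue (k + 1) = geomTrue (k + 1) + 9 ^ (k + 1)
    rw [show geomTrue (k + 1) = 1 + 9 * geomTrue k from rfl, pow_succ]
    linarith

theorem geomTrue_add (a b : Nat) : geomTrue (b + a) = geomTrue b + 9 ^ b * geomTrue a := by
  induction a with
  | zero => simp [geomTrue]
  | succ k ih =>
    rw [← Nat.add_assoc, geomTrue_succ_top, ih, geomTrue_succ_top, pow_add]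
    ring

theorem eight_mul_geomTrue (q : Nat) : 8 * geomTrue q = 9 ^ q - 1 := by
  induction q with
  | zero => simp [geomTrue]
  | succ k ih => rw [show geomTrue (k + 1) = 1 + 9 * geomTrue k from rfl, pow_succ]; nlinarith [ih]

-- Python's % reads only the residue class of its left argument
theorem pymod_modEq (x P : Int) : Int.ModEq P (PySem.Int.mod x P) x := by
  rw [Int.modEq_iff_dvd]
  have h := Int.fmod_add_mul_fdiv x P
  exact ⟨x.fdiv P, by simp only [PySem.Int.mod]; linarith⟩

theorem pymod_congr (P a b : Int) (h : Int.ModEq P a b) : PySem.Int.mod a P = PySem.Int.mod b P := by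
  simp only [PySem.Int.mod]
  obtain ⟨k, hk⟩ := Int.modEq_iff_dvd.mp h
  have : a = b + P * (-k) := by linarith
  subst this
  simp

-- B's divide-and-conquer accumulator is geomTrue modulo P
theorem geom9_modEq (qn : Nat) (P : Int) : Int.ModEq P (geom9 (qn : Int) P) (geomTrue qn) := by
  induction qn using Nat.strong_induction_on with
  | _ qn ih =>
    rcases qn with _ | k
    · simp [geom9, geomTrue]
    · rw [geom9]
      have hpos : ¬ ((k + 1 : Nat) : Int) ≤ 0 := by omega
      rw [if_neg hpos]
      have hmod : PySem.Int.mod ((k + 1 : Nat) : Int) 2 = (((k + 1) % 2 : Nat) : Int) := by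
        exact_mod_cast PySem.Int.mod_natCast (k + 1) 2
      have hdiv : PySem.Int.floordiv ((k + 1 : Nat) : Int) 2 = (((k + 1) / 2 : Nat) : Int) := by
        exact_mod_cast PySem.Int.floordiv_natCast (k + 1) 2
      by_cases hodd : (k + 1) % 2 = 1
      · rw [if_pos (by rw [hmod, hodd]; norm_num)]
        have h1 : ((k + 1 : Nat) : Int) - 1 = (k : Int) := by push_cast; ring
        rw [h1]
        calc PySem.Int.mod (1 + 9 * geom9 (k : Int) P) P
            ≡ 1 + 9 * geom9 (k : Int) P [ZMOD P] := pymod_modEq _ _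
          _ ≡ 1 + 9 * geomTrue k [ZMOD P] := Int.ModEq.add_left 1 ((ih k (by omega)).mul_left 9)
          _ = geomTrue (k + 1) := rfl
      · rw [if_neg (by rw [hmod]; omega)]
        have hk : k + 1 = (k + 1) / 2 + (k + 1) / 2 := by omega
        set m := (k + 1) / 2 with hm
        have hmlt : m < k + 1 := by omega
        rw [hdiv]
        have htn : ((m : Int)).toNat = m := by simp
        rw [htn]
        calc PySem.Int.mod (geom9 (m : Int) P * (1 + PySem.Int.powMod 9 m P)) P
            ≡ geom9 (m : Int) P * (1 + PySem.Int.powMod 9 m P) [ZMOD P] := pymod_modEq _ _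
          _ ≡ geomTrue m * (1 + 9 ^ m) [ZMOD P] :=
              (ih m hmlt).mul
                (Int.ModEq.add_left 1 (by simpa [PySem.Int.powMod] using pymod_modEq ((9:Int) ^ m) P))
          _ = geomTrue (k + 1) := by rw [hk, geomTrue_add]; ring

-- A's scaled-modulus closed form is geomTrue's block total modulo P
theorem blockA_modEq (qn : Nat) (P : Int) :
    Int.ModEq P
      (PySem.Int.floordiv (20 * PySem.Int.powMod 9 qn (16 * P) + 32 * ((qn : Int) - 1) + 12) 16)
      (10 * geomTrue qn + 2 * qn) := by
  have hg := eight_mul_geomTrue qn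
  set d : Int := ((9:Int) ^ qn).fdiv (16 * P) with hd
  have hpm : PySem.Int.powMod 9 qn (16 * P) = 9 ^ qn - 16 * P * d := by
    have h := Int.fmod_add_mul_fdiv ((9:Int) ^ qn) (16 * P)
    simp only [PySem.Int.powMod, PySem.Int.mod]
    linarith
  have hnum : 20 * PySem.Int.powMod 9 qn (16 * P) + 32 * ((qn : Int) - 1) + 12
      = 16 * (10 * geomTrue qn + 2 * qn - 20 * P * d) := by
    rw [hpm]; linarith
  rw [hnum]
  have hfd : PySem.Int.floordiv (16 * (10 * geomTrue qn + 2 * (qn:Int) - 20 * P * d)) 16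
      = 10 * geomTrue qn + 2 * qn - 20 * P * d := by
    simp only [PySem.Int.floordiv]
    exact Int.mul_fdiv_cancel_left _ (by norm_num)
  rw [hfd, Int.modEq_iff_dvd]
  exact ⟨20 * d, by ring⟩

-- ===== VERDICT (by name: the statement is the Claim_ definition above) =====
theorem sumf_spec : Claim_equal_sumf := by
  intro N P _ hpre
  obtain ⟨hN, hP⟩ := hpre
  simp only [Spec_sumf, sumf, sumf_alt]
  by_cases h0 : N = 0
  · subst h0
    simp [geom9, PySem.Int.floordiv, PySem.Int.mod,
      PySem.List.pyRange_one_eq_nil (by norm_num : (1:Int) ≤ 1)]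
  · rw [if_neg h0]
    set q : Int := PySem.Int.floordiv N 4 with hqdef
    have hq0 : 0 ≤ q := by
      rw [hqdef]; simp only [PySem.Int.floordiv]
      exact Int.fdiv_nonneg (by omega) (by omega)
    have h45 : 4 * (q - 1) + 5 = 4 * q + 1 := by ring
    rw [h45]
    rw [PySem.List.foldl_add, PySem.List.foldl_add]
    set T : Int := ((PySem.List.pyRange (4 * q + 1) (N + 1) 1).map (fun i => pyF i P)).sum with hT
    apply pymod_congr
    set qn : Nat := q.toNat with hqn
    have hcast : q = (qn : Int) := by omega
    have hSB : Int.ModEq P (10 * geom9 q P + 2 * q) (10 * geomTrue qn + 2 * qn) := by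
      rw [hcast]
      exact Int.ModEq.add_right _ ((geom9_modEq qn P).mul_left 10)
    have hSA : Int.ModEq P
        (if q - 1 ≥ 0 then
           PySem.Int.floordiv (20 * PySem.Int.powMod 9 (q - 1 + 1).toNat (16 * P) +
             32 * (q - 1) + 12) 16
         else 0)
        (10 * geomTrue qn + 2 * qn) := by
      rcases Nat.eq_zero_or_pos qn with hz | hpos
      · rw [if_neg (by omega)]
        have : (qn : Int) = 0 := by omega
        rw [this, hz]
        simp [geomTrue]
      · rw [if_pos (by omega)]
        have ht : (q - 1 + 1).toNat = qn := by omega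
        have hq1 : q - 1 = (qn : Int) - 1 := by omega
        rw [ht, hq1]
        exact blockA_modEq qn P
    have hAB := hSA.trans hSB.symm
    obtain ⟨c, hc⟩ := Int.modEq_iff_dvd.mp hAB
    rw [Int.modEq_iff_dvd]
    exact ⟨c, by linarith⟩
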